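-- pv_equiv track=rewrite | github.com/SUT-GC/similar-calc | utils/ListUtils.py | calcSubListSum
-- ===== SOURCE A (Python) =====
-- def calcSubListSum(my_list, start, end, step):
--
--     num_list = []
--     now_num = start
--     while now_num < end:
--         num_list.append(now_num)
--         now_num += step
--     num_list.append(end)
--
--     sum_list = []
--     for x in range(len(num_list)):
--         sum_list.append(0)
--
--     # 统计范围是[a, b)
--     for x in my_list:
--         for i in range(1, len(num_list)):
--             # print x, num_list[i-1], num_list[i]
--             if x >= num_list[i] and i == len(num_list)-1:
--                 sum_list[len(sum_list)-1] += 1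
--                 break
--             if x >= num_list[i-1] and x < num_list[i]:
--                 sum_list[i-1] += 1
--                 break
--
--     result_list = []
--     for i in range(len(sum_list)):
--         result_list += [(i+1)] * sum_list[i]
--
--     return result_list
-- ===== SOURCE B (Python) =====
-- def calcSubListSum(my_list, start, end, step):
--     # Closed-form binning: the bin boundaries are an arithmetic progression, so
--     # each element's bin index is one floor division instead of a linear scan
--     # over the boundary list.
--     if start >= end:
--         return []
--     m = (end - start + step - 1) // step + 1  # number of bins incl. the overflow bin
--     cnt = [0] * m
--     for x in my_list:
--         if x >= end:
--             cnt[m - 1] += 1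
--         elif x >= start:
--             cnt[(x - start) // step] += 1
--     out = []
--     for i in range(len(cnt)):
--         out.extend([i + 1] * cnt[i])
--     return out
-- ===== Notes on version B (the rewrite author's own statement) =====
-- stated objective: faster
-- what changed: Replaces the per-element linear scan over the boundary list by a closed-form floor-division bin index (the boundaries are an arithmetic progression), counting into an array in one pass.
import Mathlib
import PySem

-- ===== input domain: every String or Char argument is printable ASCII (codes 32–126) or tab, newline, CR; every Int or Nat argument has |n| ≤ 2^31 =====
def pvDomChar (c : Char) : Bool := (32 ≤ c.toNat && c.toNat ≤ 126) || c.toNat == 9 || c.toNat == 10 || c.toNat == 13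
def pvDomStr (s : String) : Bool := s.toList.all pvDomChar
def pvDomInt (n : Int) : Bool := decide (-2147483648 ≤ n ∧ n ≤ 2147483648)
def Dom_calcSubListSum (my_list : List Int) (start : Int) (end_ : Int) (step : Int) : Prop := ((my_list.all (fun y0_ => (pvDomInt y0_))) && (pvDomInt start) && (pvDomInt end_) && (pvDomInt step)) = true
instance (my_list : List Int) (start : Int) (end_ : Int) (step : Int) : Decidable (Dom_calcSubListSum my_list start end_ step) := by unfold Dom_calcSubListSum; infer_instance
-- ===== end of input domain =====

-- B replaces A's per-element linear scan over the boundary list by a closed-form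
-- floor-division bin index (the boundaries are an arithmetic progression): faster.
-- Both ports keep Python's lists as Lean Arrays internally (a Python list is a
-- dynamic array: O(1) index/append/set), converting to List only at the boundary.

-- ===== PORT A =====
-- the while loop building num_list ('num_list.append(now_num)' = Array.push); the
-- '0 < step' conjunct is a totality guard only: when step ≤ 0 and start < end the
-- Python loop diverges (those inputs are outside Pre_).
def pvBuild (end_ step : Int) (acc : Array Int) (now : Int) : Array Int :=
  if _h : now < end_ ∧ 0 < step then pvBuild end_ step (acc.push now) (now + step) else acc
termination_by (end_ - now).toNat
decreasing_by omega

-- the inner 'for i in range(1, len(num_list))' with its two guarded breaks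
def pvScan (num_list : Array Int) (x : Int) (sl : Array Int) (i : Nat) : Array Int :=
  if i < num_list.size then
    if num_list.getD i 0 ≤ x ∧ i = num_list.size - 1 then
      sl.setIfInBounds (sl.size - 1) (sl.getD (sl.size - 1) 0 + 1)
    else if num_list.getD (i - 1) 0 ≤ x ∧ x < num_list.getD i 0 then
      sl.setIfInBounds (i - 1) (sl.getD (i - 1) 0 + 1)
    else pvScan num_list x sl (i + 1)
  else sl
termination_by num_list.size - i

def calcSubListSum (my_list : List Int) (start : Int) (end_ : Int) (step : Int) : List Int :=
  let num_list := (pvBuild end_ step #[] start).push end_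
  let sum_list := my_list.foldl (fun sl x => pvScan num_list x sl 1)
                    (Array.replicate num_list.size (0 : Int))
  (List.range sum_list.size).foldl
    (fun acc i => acc ++ List.replicate (sum_list.getD i 0).toNat ((i : Int) + 1)) []

-- ===== PORT B =====
def calcSubListSum_alt (my_list : List Int) (start : Int) (end_ : Int) (step : Int) : List Int :=
  if end_ ≤ start then []
  else
    let m := (PySem.Int.floordiv (end_ - start + step - 1) step + 1).toNat
    let cnt := my_list.foldl (fun c x =>
      if end_ ≤ x then c.setIfInBounds (m - 1) (c.getD (m - 1) 0 + 1)
      else if start ≤ x then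
        let j := (PySem.Int.floordiv (x - start) step).toNat
        c.setIfInBounds j (c.getD j 0 + 1)
      else c) (Array.replicate m (0 : Int))
    (List.range cnt.size).foldl
      (fun acc i => acc ++ List.replicate (cnt.getD i 0).toNat ((i : Int) + 1)) []

-- ===== PRECONDITION & SPEC =====
-- A's while loop never terminates when start < end and step ≤ 0; Pre_ excludes exactly that.
def Pre_calcSubListSum (my_list : List Int) (start : Int) (end_ : Int) (step : Int) : Prop :=
  start < end_ → 0 < step
instance (my_list : List Int) (start : Int) (end_ : Int) (step : Int) : Decidable (Pre_calcSubListSum my_list start end_ step) := by unfold Pre_calcSubListSum; infer_instance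

def pvWitness_calcSubListSum : List Int × Int × Int × Int := ([1, 2, 5, -3, 7], 0, 6, 2)

def Spec_calcSubListSum (my_list : List Int) (start : Int) (end_ : Int) (step : Int) (out : List Int) : Prop := out = calcSubListSum_alt my_list start end_ step
instance (my_list : List Int) (start : Int) (end_ : Int) (step : Int) (out : List Int) : Decidable (Spec_calcSubListSum my_list start end_ step out) := by unfold Spec_calcSubListSum; infer_instance

-- ===== CLAIM (what is proved, stated in full; the proofs are below) =====
def Claim_equal_calcSubListSum : Prop := ∀ (my_list : List Int) (start : Int) (end_ : Int) (step : Int), Dom_calcSubListSum my_list start end_ step → Pre_calcSubListSum my_list start end_ step → Spec_calcSubListSum my_list start end_ step (calcSubListSum my_list start end_ step)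

-- ===== LEMMAS AND PROOFS =====

-- List-level mirrors of the two loops, used only by the proofs (the ports use
-- Array for Python's O(1) list indexing; these are their toList images)
def pvBuildL (end_ step : Int) (now : Int) : List Int :=
  if _h : now < end_ ∧ 0 < step then now :: pvBuildL end_ step (now + step) else []
termination_by (end_ - now).toNat
decreasing_by omega

def pvScanL (num_list : List Int) (x : Int) (sl : List Int) (i : Nat) : List Int :=
  if i < num_list.length then
    if num_list.getD i 0 ≤ x ∧ i = num_list.length - 1 then
      sl.set (sl.length - 1) (sl.getD (sl.length - 1) 0 + 1)
    else if num_list.getD (i - 1) 0 ≤ x ∧ x < num_list.getD i 0 then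
      sl.set (i - 1) (sl.getD (i - 1) 0 + 1)
    else pvScanL num_list x sl (i + 1)
  else sl
termination_by num_list.length - i

-- abbreviations for the proofs
def pvK (start end_ step : Int) : Int := (end_ - start + step - 1) / step
def pvN (start end_ step : Int) : List Int :=
  (List.range (pvK start end_ step).toNat).map (fun j : Nat => start + (j : Int) * step) ++ [end_]

lemma pvScanL_unfold (num_list : List Int) (x : Int) (sl : List Int) (i : Nat) :
    pvScanL num_list x sl i =
      if i < num_list.length then
        if num_list.getD i 0 ≤ x ∧ i = num_list.length - 1 then
          sl.set (sl.length - 1) (sl.getD (sl.length - 1) 0 + 1)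
        else if num_list.getD (i - 1) 0 ≤ x ∧ x < num_list.getD i 0 then
          sl.set (i - 1) (sl.getD (i - 1) 0 + 1)
        else pvScanL num_list x sl (i + 1)
      else sl := by
  rw [pvScanL]

lemma pvBuildL_eq (end_ step : Int) (hs : 0 < step) (now : Int) :
    pvBuildL end_ step now =
      (List.range ((end_ - now + step - 1) / step).toNat).map (fun j : Nat => now + (j:Int) * step) := by
  fun_induction pvBuildL end_ step now with
  | case1 now h ih =>
    have hK : (end_ - now + step - 1) / step = (end_ - (now + step) + step - 1) / step + 1 := by
      have e : end_ - now + step - 1 = (end_ - (now + step) + step - 1) + 1 * step := by ring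
      rw [e, Int.add_mul_ediv_right _ _ (by omega : step ≠ 0)]
    have hK' : 0 ≤ (end_ - (now + step) + step - 1) / step :=
      Int.ediv_nonneg (by omega) (by omega)
    have ht : ((end_ - now + step - 1) / step).toNat
        = ((end_ - (now + step) + step - 1) / step).toNat + 1 := by omega
    rw [ih, ht, List.range_succ_eq_map, List.map_cons, List.map_map]
    refine congrArg₂ _ (by ring) (List.map_congr_left ?_)
    intro j _
    simp [Function.comp]
    ring
  | case2 now h =>
    have hge : end_ ≤ now := by
      rcases not_and_or.mp h with h1 | h2
      · omega
      · omega
    have hlt : (end_ - now + step - 1) / step < 1 := by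
      rw [Int.ediv_lt_iff_lt_mul hs]
      omega
    simp [Int.toNat_of_nonpos (by omega : (end_ - now + step - 1) / step ≤ 0)]

lemma pvK_pos (start end_ step : Int) (hlt : start < end_) (hs : 0 < step) :
    1 ≤ pvK start end_ step := by
  rw [pvK, Int.le_ediv_iff_mul_le hs]
  omega

lemma pvK_bounds (start end_ step : Int) (hs : 0 < step) :
    end_ - start ≤ step * pvK start end_ step ∧ step * (pvK start end_ step - 1) < end_ - start := by
  have hd := Int.mul_ediv_add_emod (end_ - start + step - 1) step
  have h1 := Int.emod_nonneg (end_ - start + step - 1) (by omega : step ≠ 0)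
  have h2 := Int.emod_lt_of_pos (end_ - start + step - 1) hs
  rw [pvK]
  constructor <;> nlinarith [hd, h1, h2]

lemma pvN_length (start end_ step : Int) :
    (pvN start end_ step).length = (pvK start end_ step).toNat + 1 := by
  simp [pvN]

lemma pvN_getD_lt (start end_ step : Int) (j : Nat) (hj : j < (pvK start end_ step).toNat) :
    (pvN start end_ step).getD j 0 = start + (j : Int) * step := by
  rw [pvN, List.getD_append _ _ _ _ (by simpa using hj),
    List.getD_eq_getElem _ _ (by simpa using hj)]
  simp

lemma pvN_getD_last (start end_ step : Int) :
    (pvN start end_ step).getD (pvK start end_ step).toNat 0 = end_ := by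
  rw [pvN, List.getD_append_right _ _ _ _ (by simp)]
  simp

lemma pvN_getD_ge (start end_ step : Int) (hlt : start < end_) (hs : 0 < step)
    (i : Nat) (hi : i ≤ (pvK start end_ step).toNat) :
    start ≤ (pvN start end_ step).getD i 0 := by
  rcases Nat.lt_or_ge i (pvK start end_ step).toNat with h | h
  · rw [pvN_getD_lt _ _ _ _ h]
    nlinarith [Int.natCast_nonneg i]
  · have : i = (pvK start end_ step).toNat := by omega
    rw [this, pvN_getD_last]
    omega

lemma pvScan_ge (start end_ step : Int) (hlt : start < end_) (hs : 0 < step)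
    (x : Int) (hx : end_ ≤ x) (sl : List Int) :
    ∀ (d i : Nat), 1 ≤ i → i ≤ (pvK start end_ step).toNat → (pvK start end_ step).toNat - i = d →
      pvScanL (pvN start end_ step) x sl i
        = sl.set (sl.length - 1) (sl.getD (sl.length - 1) 0 + 1) := by
  have hKc : ((pvK start end_ step).toNat : Int) = pvK start end_ step :=
    Int.toNat_of_nonneg (by have := pvK_pos start end_ step hlt hs; omega)
  have hb := pvK_bounds start end_ step hs
  intro d
  induction d with
  | zero =>
    intro i h1 h2 h3
    have hik : i = (pvK start end_ step).toNat := by omega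
    subst hik
    rw [pvScanL_unfold, if_pos (by rw [pvN_length]; omega),
      if_pos ⟨by rw [pvN_getD_last]; exact hx, by rw [pvN_length]; omega⟩]
  | succ n ih =>
    intro i h1 h2 h3
    have hik : i < (pvK start end_ step).toNat := by omega
    have hgd : (pvN start end_ step).getD i 0 = start + (i : Int) * step :=
      pvN_getD_lt _ _ _ _ hik
    have hiK : (i : Int) ≤ pvK start end_ step - 1 := by omega
    have hlt' : start + (i : Int) * step < end_ := by nlinarith [hb.2]
    rw [pvScanL_unfold, if_pos (by rw [pvN_length]; omega),
      if_neg (by rw [pvN_length]; rintro ⟨-, h⟩; omega),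
      if_neg (by rw [hgd]; rintro ⟨-, h⟩; omega)]
    exact ih (i + 1) (by omega) (by omega) (by omega)

lemma pvScan_mid (start end_ step : Int) (hlt : start < end_) (hs : 0 < step)
    (x : Int) (hx1 : start ≤ x) (hx2 : x < end_) (sl : List Int) :
    ∀ (d i : Nat), 1 ≤ i → i ≤ ((x - start) / step).toNat + 1 →
      ((x - start) / step).toNat + 1 - i = d →
      pvScanL (pvN start end_ step) x sl i
        = sl.set ((x - start) / step).toNat
            (sl.getD ((x - start) / step).toNat 0 + 1) := by
  have hKc : ((pvK start end_ step).toNat : Int) = pvK start end_ step :=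
    Int.toNat_of_nonneg (by have := pvK_pos start end_ step hlt hs; omega)
  have hb := pvK_bounds start end_ step hs
  have hjnn : 0 ≤ (x - start) / step := Int.ediv_nonneg (by omega) (by omega)
  have hjc : (((x - start) / step).toNat : Int) = (x - start) / step := Int.toNat_of_nonneg hjnn
  have hd := Int.mul_ediv_add_emod (x - start) step
  have h1 := Int.emod_nonneg (x - start) (by omega : step ≠ 0)
  have h2 := Int.emod_lt_of_pos (x - start) hs
  have hjlo : step * ((x - start) / step) ≤ x - start := by omega
  have hjhi : x - start < step * ((x - start) / step + 1) := by nlinarith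
  have hjK : ((x - start) / step).toNat < (pvK start end_ step).toNat := by
    have : step * ((x - start) / step) < step * pvK start end_ step := by omega
    have := lt_of_mul_lt_mul_left this (by omega : (0:Int) ≤ step)
    omega
  intro d
  induction d with
  | zero =>
    intro i h1i h2i h3i
    have hij : i = ((x - start) / step).toNat + 1 := by omega
    subst hij
    have hc2 : x < (pvN start end_ step).getD (((x - start) / step).toNat + 1) 0 := by
      rcases Nat.lt_or_ge (((x - start) / step).toNat + 1) (pvK start end_ step).toNat with h | h
      · rw [pvN_getD_lt _ _ _ _ h]
        push_cast
        nlinarith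
      · have he : ((x - start) / step).toNat + 1 = (pvK start end_ step).toNat := by omega
        rw [he, pvN_getD_last]
        exact hx2
    rw [pvScanL_unfold, if_pos (by rw [pvN_length]; omega),
      if_neg (by rintro ⟨hle, -⟩; omega),
      if_pos ⟨by rw [Nat.add_sub_cancel, pvN_getD_lt start end_ step _ hjK]; nlinarith, by simpa using hc2⟩]
    simp
  | succ n ih =>
    intro i h1i h2i h3i
    have hij : i ≤ ((x - start) / step).toNat := by omega
    have hik : i < (pvK start end_ step).toNat := by omega
    have hgd : (pvN start end_ step).getD i 0 = start + (i : Int) * step :=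
      pvN_getD_lt _ _ _ _ hik
    have hle : start + (i : Int) * step ≤ x := by
      have : (i : Int) ≤ (x - start) / step := by omega
      nlinarith
    rw [pvScanL_unfold, if_pos (by rw [pvN_length]; omega),
      if_neg (by rw [pvN_length]; rintro ⟨-, h⟩; omega),
      if_neg (by rw [hgd]; rintro ⟨-, h⟩; omega)]
    exact ih (i + 1) (by omega) (by omega) (by omega)

lemma pvScan_lt (start end_ step : Int) (hlt : start < end_) (hs : 0 < step)
    (x : Int) (hx : x < start) (sl : List Int) :
    ∀ (d i : Nat), 1 ≤ i → (pvN start end_ step).length - i = d →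
      pvScanL (pvN start end_ step) x sl i = sl := by
  intro d
  induction d with
  | zero =>
    intro i h1 h2
    rw [pvScanL_unfold, if_neg (by omega)]
  | succ n ih =>
    intro i h1 h2
    have hilen : i < (pvN start end_ step).length := by omega
    have hik : i ≤ (pvK start end_ step).toNat := by
      rw [pvN_length] at hilen; omega
    rw [pvScanL_unfold, if_pos hilen,
      if_neg (by rintro ⟨h, -⟩; have := pvN_getD_ge start end_ step hlt hs i hik; omega),
      if_neg (by rintro ⟨h, -⟩; have := pvN_getD_ge start end_ step hlt hs (i - 1) (by omega); omega)]
    exact ih (i + 1) (by omega) (by omega)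

lemma update_eq (start end_ step : Int) (hlt : start < end_) (hs : 0 < step)
    (sl : List Int) (x : Int) (hsl : sl.length = (pvK start end_ step).toNat + 1) :
    pvScanL (pvN start end_ step) x sl 1 =
      (if end_ ≤ x then
        sl.set ((pvK start end_ step).toNat + 1 - 1)
          (sl.getD ((pvK start end_ step).toNat + 1 - 1) 0 + 1)
      else if start ≤ x then
        sl.set ((PySem.Int.floordiv (x - start) step).toNat)
          (sl.getD ((PySem.Int.floordiv (x - start) step).toNat) 0 + 1)
      else sl) := by
  have hk1 := pvK_pos start end_ step hlt hs
  rw [PySem.Int.floordiv_eq_ediv_of_pos hs]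
  by_cases h1 : end_ ≤ x
  · rw [if_pos h1,
      pvScan_ge start end_ step hlt hs x h1 sl ((pvK start end_ step).toNat - 1) 1
        le_rfl (by omega) rfl, hsl]
  · rw [if_neg h1]
    by_cases h2 : start ≤ x
    · rw [if_pos h2,
        pvScan_mid start end_ step hlt hs x h2 (by omega) sl ((x - start) / step).toNat 1
          le_rfl (by omega) (by omega)]
    · rw [if_neg h2,
        pvScan_lt start end_ step hlt hs x (by omega) sl ((pvN start end_ step).length - 1) 1
          le_rfl rfl]

lemma foldl_congr_len (m : Nat) (f g : List Int → Int → List Int)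
    (hg : ∀ sl x, sl.length = m → (g sl x).length = m)
    (hfg : ∀ sl x, sl.length = m → f sl x = g sl x) :
    ∀ (l : List Int) (sl : List Int), sl.length = m → l.foldl f sl = l.foldl g sl := by
  intro l
  induction l with
  | nil => intro sl h; rfl
  | cons a t ih =>
    intro sl h
    simp only [List.foldl_cons, hfg sl a h]
    exact ih _ (hg sl a h)


-- List-level images of the two ports (proof-only)
def calcA_L (my_list : List Int) (start : Int) (end_ : Int) (step : Int) : List Int :=
  let num_list := pvBuildL end_ step start ++ [end_]
  let sum_list := my_list.foldl (fun sl x => pvScanL num_list x sl 1)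
                    (List.replicate num_list.length (0 : Int))
  (List.range sum_list.length).foldl
    (fun acc i => acc ++ List.replicate (sum_list.getD i 0).toNat ((i : Int) + 1)) []

def calcB_L (my_list : List Int) (start : Int) (end_ : Int) (step : Int) : List Int :=
  if end_ ≤ start then []
  else
    let m := (PySem.Int.floordiv (end_ - start + step - 1) step + 1).toNat
    let cnt := my_list.foldl (fun c x =>
      if end_ ≤ x then c.set (m - 1) (c.getD (m - 1) 0 + 1)
      else if start ≤ x then
        let j := (PySem.Int.floordiv (x - start) step).toNat
        c.set j (c.getD j 0 + 1)
      else c) (List.replicate m (0 : Int))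
    (List.range cnt.length).foldl
      (fun acc i => acc ++ List.replicate (cnt.getD i 0).toNat ((i : Int) + 1)) []

lemma main_L (my_list : List Int) (start end_ step : Int)
    (hpre : start < end_ → 0 < step) :
    calcA_L my_list start end_ step = calcB_L my_list start end_ step := by
  by_cases hse : end_ ≤ start
  · -- A builds num_list = [end_] and the inner loop never runs; both sides are []
    have hb : pvBuildL end_ step start = [] := by
      rw [pvBuildL]
      simp only [dif_neg (by omega : ¬(start < end_ ∧ 0 < step))]
    have hscan : ∀ x sl, pvScanL [end_] x sl 1 = sl := by
      intro x sl
      rw [pvScanL_unfold]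
      simp
    have hfold : ∀ (l : List Int) (sl : List Int),
        l.foldl (fun sl x => pvScanL [end_] x sl 1) sl = sl := by
      intro l sl
      simp [hscan]
    rw [calcA_L, calcB_L, if_pos hse]
    simp only [hb, List.nil_append, hfold]
    simp
  · have hlt : start < end_ := by omega
    have hs : 0 < step := hpre hlt
    have hk1 := pvK_pos start end_ step hlt hs
    have hm : (PySem.Int.floordiv (end_ - start + step - 1) step + 1).toNat
        = (pvK start end_ step).toNat + 1 := by
      rw [PySem.Int.floordiv_eq_ediv_of_pos hs, pvK] at *
      omega
    have hN : pvBuildL end_ step start ++ [end_] = pvN start end_ step := by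
      rw [pvBuildL_eq end_ step hs start, pvN, pvK]
    rw [calcA_L, calcB_L, if_neg hse]
    simp only [hN, hm, pvN_length]
    set m := (pvK start end_ step).toNat + 1 with hmdef
    have hg : ∀ (sl : List Int) (x : Int), sl.length = m →
        ((if end_ ≤ x then sl.set (m - 1) (sl.getD (m - 1) 0 + 1)
          else if start ≤ x then
            sl.set ((PySem.Int.floordiv (x - start) step).toNat)
              (sl.getD ((PySem.Int.floordiv (x - start) step).toNat) 0 + 1)
          else sl)).length = m := by
      intro sl x h
      split_ifs <;> simp [h]
    have hcnt : my_list.foldl (fun sl x => pvScanL (pvN start end_ step) x sl 1)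
          (List.replicate m (0 : Int))
        = my_list.foldl (fun c x =>
            if end_ ≤ x then c.set (m - 1) (c.getD (m - 1) 0 + 1)
            else if start ≤ x then
              c.set ((PySem.Int.floordiv (x - start) step).toNat)
                (c.getD ((PySem.Int.floordiv (x - start) step).toNat) 0 + 1)
            else c) (List.replicate m (0 : Int)) := by
      refine foldl_congr_len m _ _ hg ?_ my_list _ (by simp)
      intro sl x h
      rw [update_eq start end_ step hlt hs sl x (by omega)]
    rw [hcnt]

-- bridges between the Array ports and their List images
lemma arr_getD (a : Array Int) (i : Nat) (d : Int) : a.getD i d = a.toList.getD i d := by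
  rcases Nat.lt_or_ge i a.size with h | h
  · rw [Array.getD, dif_pos h, List.getD_eq_getElem _ _ (by simpa using h)]
    simp
  · rw [Array.getD, dif_neg (by omega), List.getD_eq_default _ _ (by simpa using h)]

lemma build_bridge (end_ step : Int) : ∀ (acc : Array Int) (now : Int),
    (pvBuild end_ step acc now).toList = acc.toList ++ pvBuildL end_ step now := by
  intro acc now
  fun_induction pvBuild end_ step acc now with
  | case1 acc now h ih =>
    rw [ih]
    conv_rhs => rw [pvBuildL, dif_pos h]
    simp
  | case2 acc now h =>
    rw [pvBuildL, dif_neg h]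
    simp

lemma scan_bridge (N : Array Int) (x : Int) : ∀ (sl : Array Int) (i : Nat),
    (pvScan N x sl i).toList = pvScanL N.toList x sl.toList i := by
  intro sl i
  fun_induction pvScan N x sl i with
  | case1 i h1 h2 =>
    rw [pvScanL_unfold, if_pos (by simpa using h1), if_pos (by simpa [arr_getD] using h2)]
    simp [arr_getD]
  | case2 i h1 h2 h3 =>
    rw [pvScanL_unfold, if_pos (by simpa using h1),
      if_neg (by simpa [arr_getD] using h2), if_pos (by simpa [arr_getD] using h3)]
    simp [arr_getD]
  | case3 i h1 h2 h3 ih =>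
    rw [pvScanL_unfold, if_pos (by simpa using h1),
      if_neg (by simpa [arr_getD] using h2), if_neg (by simpa [arr_getD] using h3)]
    exact ih
  | case4 i h1 =>
    rw [pvScanL_unfold, if_neg (by simpa using h1)]

lemma fold_bridge (F : Array Int → Int → Array Int) (G : List Int → Int → List Int)
    (h : ∀ (A : Array Int) (x : Int), (F A x).toList = G A.toList x) :
    ∀ (l : List Int) (A : Array Int), (l.foldl F A).toList = l.foldl G A.toList := by
  intro l
  induction l with
  | nil => intro A; rfl
  | cons a t ih =>
    intro A
    simp only [List.foldl_cons, ih, h]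

lemma portA_eq (my_list : List Int) (start end_ step : Int) :
    calcSubListSum my_list start end_ step = calcA_L my_list start end_ step := by
  rw [calcSubListSum, calcA_L]
  have hNtl : ((pvBuild end_ step #[] start).push end_).toList
      = pvBuildL end_ step start ++ [end_] := by
    rw [Array.toList_push, build_bridge]
    simp
  have hsize : ((pvBuild end_ step #[] start).push end_).size
      = (pvBuildL end_ step start ++ [end_]).length := by
    rw [← hNtl, Array.length_toList]
  have hS : (my_list.foldl (fun sl x => pvScan ((pvBuild end_ step #[] start).push end_) x sl 1)
        (Array.replicate (pvBuildL end_ step start ++ [end_]).length (0 : Int))).toList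
      = my_list.foldl (fun sl x => pvScanL (pvBuildL end_ step start ++ [end_]) x sl 1)
        (List.replicate (pvBuildL end_ step start ++ [end_]).length (0 : Int)) := by
    rw [fold_bridge (fun sl x => pvScan ((pvBuild end_ step #[] start).push end_) x sl 1)
      (fun sl x => pvScanL (pvBuildL end_ step start ++ [end_]) x sl 1)
      (fun A x => by rw [scan_bridge, hNtl])]
    rw [Array.toList_replicate]
  rw [hsize, ← hS]
  simp only [Array.length_toList, ← arr_getD]

lemma portB_eq (my_list : List Int) (start end_ step : Int) :
    calcSubListSum_alt my_list start end_ step = calcB_L my_list start end_ step := by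
  rw [calcSubListSum_alt, calcB_L]
  by_cases hse : end_ ≤ start
  · rw [if_pos hse, if_pos hse]
  · rw [if_neg hse, if_neg hse]
    dsimp only
    set m := (PySem.Int.floordiv (end_ - start + step - 1) step + 1).toNat with hm
    have hC : (my_list.foldl (fun c x =>
          if end_ ≤ x then c.setIfInBounds (m - 1) (c.getD (m - 1) 0 + 1)
          else if start ≤ x then
            c.setIfInBounds ((PySem.Int.floordiv (x - start) step).toNat)
              (c.getD ((PySem.Int.floordiv (x - start) step).toNat) 0 + 1)
          else c) (Array.replicate m (0 : Int))).toList
        = my_list.foldl (fun c x =>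
          if end_ ≤ x then c.set (m - 1) (c.getD (m - 1) 0 + 1)
          else if start ≤ x then
            c.set ((PySem.Int.floordiv (x - start) step).toNat)
              (c.getD ((PySem.Int.floordiv (x - start) step).toNat) 0 + 1)
          else c) (List.replicate m (0 : Int)) := by
      rw [fold_bridge (fun c x =>
          if end_ ≤ x then c.setIfInBounds (m - 1) (c.getD (m - 1) 0 + 1)
          else if start ≤ x then
            c.setIfInBounds ((PySem.Int.floordiv (x - start) step).toNat)
              (c.getD ((PySem.Int.floordiv (x - start) step).toNat) 0 + 1)
          else c)
        (fun c x =>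
          if end_ ≤ x then c.set (m - 1) (c.getD (m - 1) 0 + 1)
          else if start ≤ x then
            c.set ((PySem.Int.floordiv (x - start) step).toNat)
              (c.getD ((PySem.Int.floordiv (x - start) step).toNat) 0 + 1)
          else c)
        (fun A x => by dsimp only; split_ifs <;> simp [arr_getD, Array.toList_setIfInBounds])]
      rw [Array.toList_replicate]
    rw [← hC]
    simp only [Array.length_toList, ← arr_getD]

-- ===== VERDICT (by name: the statement is the Claim_ definition above) =====
theorem calcSubListSum_spec : Claim_equal_calcSubListSum := by
  intro my_list start end_ step _hdom hpre
  unfold Spec_calcSubListSum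
  rw [portA_eq, portB_eq]
  exact main_L my_list start end_ step hpre
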